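-- pv_equiv track=rewrite | github.com/aparajeya/InShorts_Project | InShorts_Project/helpers.py | select_top_articles
-- ===== SOURCE A (Python) =====
-- def select_top_articles(article_lists, max_articles=5):
--     """
--     Selects up to `max_articles` from the given list of article lists.
--     It picks one article from each list in round-robin fashion.
--
--     Args:
--         article_lists (List[List[dict]]): A list containing multiple article lists.
--         max_articles (int): Maximum number of articles to return.
--
--     Returns:
--         List[dict]: Combined list of up to `max_articles` articles.
--     """
--     final_articles = []
--     index = 0
--
--     while len(final_articles) < max_articles:
--         added_any = False
--
--         for articles in article_lists:
--             if index < len(articles):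
--                 final_articles.append(articles[index])
--                 added_any = True
--
--             if len(final_articles) == max_articles:
--                 break
--
--         if not added_any:
--             break
--
--         index += 1
--
--     return final_articles
-- ===== SOURCE B (Python) =====
-- def select_top_articles(article_lists, max_articles=5):
--     """Decorate-sort-undecorate: tag every article with its index inside its
--     own list, stable-sort all tags by that index (ties keep list order, which
--     gives exactly the round-robin order), and keep the first max_articles."""
--     decorated = [(i, article)
--                  for articles in article_lists
--                  for i, article in enumerate(articles)]
--     decorated.sort(key=lambda tag: tag[0])
--     return [article for _, article in decorated[:max(max_articles, 0)]]
-- ===== Notes on version B (the rewrite author's own statement) =====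
-- stated objective: alternative
-- what changed: Replaces A's while/index/added_any round-robin scanning loop with a decorate-sort-undecorate pipeline: every article is tagged with its index inside its own list, the flattened tagged list is stable-sorted by that index (ties keep list order, which is exactly the round-robin order), and the first max(max_articles,0) articles are kept.
import Mathlib
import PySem

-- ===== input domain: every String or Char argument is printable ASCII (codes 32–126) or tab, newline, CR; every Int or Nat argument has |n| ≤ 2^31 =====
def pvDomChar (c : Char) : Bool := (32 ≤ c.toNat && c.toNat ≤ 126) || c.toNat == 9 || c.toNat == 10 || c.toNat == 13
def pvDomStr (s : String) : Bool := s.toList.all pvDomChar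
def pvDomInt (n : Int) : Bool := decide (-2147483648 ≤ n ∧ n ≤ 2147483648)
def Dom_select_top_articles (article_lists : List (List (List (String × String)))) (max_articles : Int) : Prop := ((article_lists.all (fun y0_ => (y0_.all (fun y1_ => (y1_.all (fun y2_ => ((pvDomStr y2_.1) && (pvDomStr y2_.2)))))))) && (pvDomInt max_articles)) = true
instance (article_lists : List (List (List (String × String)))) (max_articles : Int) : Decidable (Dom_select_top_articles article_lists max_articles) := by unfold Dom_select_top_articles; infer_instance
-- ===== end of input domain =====

-- B replaces A's while/index/added_any round-robin loop by decorate-sort-undecorate: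
-- tag each article with its index in its own list, stable-sort the flattened tags by
-- that index (ties keep list order = round-robin order), take the first max_articles.

-- length of the longest inner list (the bound of A's while loop, used for its termination)
def pvMaxLen (article_lists : List (List (List (String × String)))) : Nat :=
  (article_lists.map List.length).foldr Nat.max 0

-- ===== PORT A =====
-- the inner `for articles in article_lists` loop with its `break`; returns (final_articles, added_any)
def pvInnerA (lists : List (List (List (String × String)))) (index : Nat) (m : Int)
    (final : List (List (String × String))) (added : Bool) :
    List (List (String × String)) × Bool :=
  match lists with
  | [] => (final, added)
  | articles :: rest =>
    if h : index < articles.length then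
      -- append articles[index], set added_any, then the break check
      if ((final ++ [articles[index]]).length : Int) = m then (final ++ [articles[index]], true)
      else pvInnerA rest index m (final ++ [articles[index]]) true
    else
      -- no append; the break check (cannot fire: length only reaches m via an append)
      if (final.length : Int) = m then (final, added)
      else pvInnerA rest index m final added

-- `added_any = true` only when some list still has an element at `index` (termination of A's while loop)
theorem pvInnerA_added (lists : List (List (List (String × String)))) (index : Nat) (m : Int)
    (final : List (List (String × String))) (added : Bool) :
    (pvInnerA lists index m final added).2 = true →
    added = true ∨ ∃ l ∈ lists, index < l.length := by
  induction lists generalizing final added with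
  | nil => simp [pvInnerA]
  | cons articles rest ih =>
    simp only [pvInnerA]
    split
    · rename_i h
      split
      · intro _; exact Or.inr ⟨articles, List.mem_cons_self, h⟩
      · intro _; exact Or.inr ⟨articles, List.mem_cons_self, h⟩
    · split
      · intro h2; exact Or.inl h2
      · intro h2
        rcases ih _ _ h2 with h3 | ⟨l, hl, hi⟩
        · exact Or.inl h3
        · exact Or.inr ⟨l, List.mem_cons_of_mem _ hl, hi⟩

theorem pvMaxLen_mem (lists : List (List (List (String × String)))) (l : List (List (String × String)))
    (hl : l ∈ lists) : l.length ≤ pvMaxLen lists := by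
  induction lists with
  | nil => cases hl
  | cons a rest ih =>
    have hml : pvMaxLen (a :: rest) = Nat.max a.length (pvMaxLen rest) := rfl
    rcases List.mem_cons.mp hl with rfl | hl
    · rw [hml]; exact Nat.le_max_left _ _
    · rw [hml]; exact le_trans (ih hl) (Nat.le_max_right _ _)

-- the outer `while len(final_articles) < max_articles` loop
def pvOuterA (lists : List (List (List (String × String)))) (m : Int)
    (final : List (List (String × String))) (index : Nat) :
    List (List (String × String)) :=
  if (final.length : Int) < m then
    if hadd : (pvInnerA lists index m final false).2 = true then
      pvOuterA lists m (pvInnerA lists index m final false).1 (index + 1)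
    else (pvInnerA lists index m final false).1
  else final
termination_by pvMaxLen lists + 1 - index
decreasing_by
  rcases pvInnerA_added lists index m final false hadd with h | ⟨l, hl, hi⟩
  · simp at h
  · have := pvMaxLen_mem lists l hl
    omega

def select_top_articles (article_lists : List (List (List (String × String)))) (max_articles : Int) : List (List (String × String)) :=
  pvOuterA article_lists max_articles [] 0

-- ===== PORT B =====
-- decorated = [(i, article) for articles in article_lists for i, article in enumerate(articles)]
def pvDecorated (article_lists : List (List (List (String × String)))) :
    List (Int × List (String × String)) :=
  article_lists.flatMap (fun articles => PySem.List.enumerate articles)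

def select_top_articles_alt (article_lists : List (List (List (String × String)))) (max_articles : Int) : List (List (String × String)) :=
  -- decorated.sort(key=lambda tag: tag[0])  (stable sort)
  let sortedTags := PySem.List.sorted (pvDecorated article_lists) (fun tag => tag.1)
  -- [article for _, article in decorated[:max(max_articles, 0)]]
  (sortedTags.take (max max_articles 0).toNat).map (fun tag => tag.2)

-- ===== PRECONDITION & SPEC =====
def Spec_select_top_articles (article_lists : List (List (List (String × String)))) (max_articles : Int) (out : List (List (String × String))) : Prop := out = select_top_articles_alt article_lists max_articles
instance (article_lists : List (List (List (String × String)))) (max_articles : Int) (out : List (List (String × String))) : Decidable (Spec_select_top_articles article_lists max_articles out) := by unfold Spec_select_top_articles; infer_instance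

-- ===== CLAIM (what is proved, stated in full; the proofs are below) =====
def Claim_equal_select_top_articles : Prop := ∀ (article_lists : List (List (List (String × String)))) (max_articles : Int), Dom_select_top_articles article_lists max_articles → Spec_select_top_articles article_lists max_articles (select_top_articles article_lists max_articles)

-- ===== LEMMAS AND PROOFS =====

-- column i: the articles at index i of each list that still has one (round-robin round i)
def pvCol (article_lists : List (List (List (String × String)))) (i : Nat) : List (List (String × String)) :=
  article_lists.filterMap (fun l => l[i]?)

-- the columns from `index` on, concatenated (what A's remaining rounds can still collect)
def pvColsFrom (lists : List (List (List (String × String)))) (index : Nat) :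
    List (List (String × String)) :=
  if index < pvMaxLen lists then pvCol lists index ++ pvColsFrom lists (index + 1) else []
termination_by pvMaxLen lists - index

theorem pvCol_empty_iff (lists : List (List (List (String × String)))) (i : Nat) :
    pvCol lists i = [] ↔ pvMaxLen lists ≤ i := by
  induction lists with
  | nil => simp [pvCol, pvMaxLen]
  | cons a rest ih =>
    have hml : pvMaxLen (a :: rest) = Nat.max a.length (pvMaxLen rest) := rfl
    rw [hml, Nat.max_le]
    simp only [pvCol, List.filterMap_cons] at *
    constructor
    · intro h
      cases hga : a[i]? with
      | none =>
        rw [hga] at h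
        refine ⟨?_, ih.mp h⟩
        by_contra hc
        push_neg at hc
        exact absurd hga (by simp [List.getElem?_eq_getElem hc])
      | some v => rw [hga] at h; simp at h
    · rintro ⟨ha, hr⟩
      have hga : a[i]? = none := List.getElem?_eq_none ha
      rw [hga]
      exact ih.mpr hr

theorem pvInnerA_spec (lists : List (List (List (String × String)))) (index : Nat) (m : Int)
    (final : List (List (String × String))) (added : Bool)
    (hlt : (final.length : Int) < m) :
    pvInnerA lists index m final added =
      (final ++ (pvCol lists index).take (m.toNat - final.length),
       added || !(pvCol lists index).isEmpty) := by
  induction lists generalizing final added with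
  | nil => simp [pvInnerA, pvCol]
  | cons articles rest ih =>
    have hk : 1 ≤ m.toNat - final.length := by omega
    simp only [pvInnerA]
    by_cases h : index < articles.length
    · have hcol : pvCol (articles :: rest) index = articles[index] :: pvCol rest index := by
        simp [pvCol, List.filterMap_cons, List.getElem?_eq_getElem h]
      rw [dif_pos h]
      by_cases heq : ((final ++ [articles[index]]).length : Int) = m
      · have hk1 : m.toNat - final.length = 1 := by
          simp only [List.length_append, List.length_cons, List.length_nil] at heq
          omega
        rw [if_pos heq]
        rw [hcol, hk1]
        simp
      · have hlt2 : ((final ++ [articles[index]]).length : Int) < m := by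
          simp only [List.length_append, List.length_cons, List.length_nil] at heq ⊢
          omega
        rw [if_neg heq]
        rw [ih _ _ hlt2]
        rw [hcol]
        have hksub : m.toNat - (final ++ [articles[index]]).length = m.toNat - final.length - 1 := by
          simp; omega
        rw [hksub]
        have htake : (articles[index] :: pvCol rest index).take (m.toNat - final.length) =
            articles[index] :: (pvCol rest index).take (m.toNat - final.length - 1) := by
          have h5 : m.toNat - final.length = (m.toNat - final.length - 1) + 1 := by omega
          conv_lhs => rw [h5]
          rw [List.take_succ_cons]
        rw [htake]
        simp [hcol]
    · have hcol : pvCol (articles :: rest) index = pvCol rest index := by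
        simp only [pvCol, List.filterMap_cons, List.getElem?_eq_none (by omega : articles.length ≤ index)]
      rw [dif_neg h, if_neg (by omega : ¬ ((final.length : Int) = m))]
      rw [ih _ _ hlt, hcol]

theorem pvOuterA_spec (lists : List (List (List (String × String)))) (m : Int)
    (final : List (List (String × String))) (index : Nat)
    (hlt : (final.length : Int) < m) :
    pvOuterA lists m final index = (final ++ pvColsFrom lists index).take m.toNat := by
  rw [pvOuterA, if_pos hlt]
  rw [pvInnerA_spec lists index m final false hlt]
  by_cases hc : pvCol lists index = []
  · have hge : pvMaxLen lists ≤ index := (pvCol_empty_iff lists index).mp hc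
    rw [pvColsFrom, if_neg (by omega)]
    simp [hc, List.take_of_length_le (show final.length ≤ m.toNat from by omega)]
  · have hidx : index < pvMaxLen lists := by
      by_contra hge
      exact hc ((pvCol_empty_iff lists index).mpr (by omega))
    have hcols : pvColsFrom lists index = pvCol lists index ++ pvColsFrom lists (index + 1) := by
      rw [pvColsFrom, if_pos hidx]
    have hb : (false || !(pvCol lists index).isEmpty) = true := by
      simp [List.isEmpty_eq_false_iff.mpr hc]
    simp only [dif_pos hb]
    set c := pvCol lists index with hcdef
    set k := m.toNat - final.length with hkdef
    by_cases hlen : k ≤ c.length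
    · -- the cap is reached inside this column: the while loop stops
      have hflen : ((final ++ c.take k).length : Int) = m := by
        simp [List.length_take, hkdef]
        omega
      have hn : ¬ (((final ++ c.take k).length : Int) < m) := by omega
      rw [pvOuterA, if_neg hn]
      rw [hcols, ← List.append_assoc]
      rw [List.take_append, List.take_append]
      have h1 : final.take m.toNat = final := List.take_of_length_le (by omega)
      have h4 : m.toNat - (final ++ c).length = 0 := by
        rw [List.length_append]; omega
      rw [h4, List.take_zero, List.append_nil, h1]
    · -- the whole column fits: continue with the next index
      push_neg at hlen
      have htk : c.take k = c := List.take_of_length_le (by omega)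
      have hlt2 : (((final ++ c.take k).length : Int)) < m := by
        simp [htk]
        omega
      rw [pvOuterA_spec lists m (final ++ c.take k) (index + 1) hlt2]
      rw [hcols, htk, List.append_assoc]
termination_by pvMaxLen lists + 1 - index
decreasing_by omega

theorem pvColsFrom_eq (lists : List (List (List (String × String)))) (index : Nat) :
    pvColsFrom lists index =
      ((List.range' index (pvMaxLen lists - index)).map (pvCol lists)).flatten := by
  by_cases h : index < pvMaxLen lists
  · rw [pvColsFrom, if_pos h]
    have hn : pvMaxLen lists - index = (pvMaxLen lists - (index + 1)) + 1 := by omega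
    rw [hn, List.range'_succ]
    simp only [List.map_cons, List.flatten_cons]
    rw [pvColsFrom_eq lists (index + 1)]
  · rw [pvColsFrom, if_neg h]
    have hn : pvMaxLen lists - index = 0 := by omega
    simp [hn]
termination_by pvMaxLen lists - index
decreasing_by omega

-- ========== B-side: characterising the stable sort ==========

-- insertBy skips a prefix it does not go before
theorem pvInsertBy_append_left {α : Type} (before : α → α → Bool) (x : α)
    (as bs : List α) (h : ∀ a ∈ as, before x a = false) :
    PySem.List.insertBy before x (as ++ bs) = as ++ PySem.List.insertBy before x bs := by
  induction as with
  | nil => simp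
  | cons a as ih =>
    have ha : before x a = false := h a List.mem_cons_self
    simp only [List.cons_append, PySem.List.insertBy, ha]
    simp only [Bool.false_eq_true, if_false, List.cons.injEq, true_and]
    exact ih (fun a ha => h a (List.mem_cons_of_mem _ ha))

-- insertBy goes to the front of a list it goes entirely before
theorem pvInsertBy_front {α : Type} (before : α → α → Bool) (x : α)
    (ys : List α) (h : ∀ y ∈ ys, before x y = true) :
    PySem.List.insertBy before x ys = x :: ys := by
  cases ys with
  | nil => rfl
  | cons y ys => simp [PySem.List.insertBy, h y List.mem_cons_self]

-- stable insertion sort by a bounded nonnegative integer key = concatenation of the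
-- key-value groups in original order
theorem pvSorted_groups {α : Type} (xs : List α) (key : α → Int) (K : Nat)
    (hb : ∀ x ∈ xs, 0 ≤ key x ∧ key x < (K : Int)) :
    PySem.List.sorted xs key =
      ((List.range K).map (fun k : Nat => xs.filter (fun t => decide (key t = (k : Int))))).flatten := by
  induction xs using List.reverseRecOn with
  | nil => simp [PySem.List.sorted]
  | append_singleton xs x ih =>
    have hbx := hb x (by simp)
    have hbxs : ∀ y ∈ xs, 0 ≤ key y ∧ key y < (K : Int) := fun y hy => hb y (by simp [hy])
    have hstep : PySem.List.sorted (xs ++ [x]) key =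
        PySem.List.insertBy (fun a b => decide (key a < key b)) x (PySem.List.sorted xs key) := by
      rw [PySem.List.sorted_eq_foldl_insertBy, PySem.List.sorted_eq_foldl_insertBy,
        List.foldl_append]
      rfl
    rw [hstep, ih hbxs]
    set k := (key x).toNat with hkdef
    have hkx : key x = (k : Int) := by omega
    have hkK : k < K := by omega
    have hsplit : K = (k + 1) + (K - (k + 1)) := by omega
    set g : Nat → List α := fun j => xs.filter (fun t => decide (key t = (j : Int))) with hg
    set g' : Nat → List α := fun j => (xs ++ [x]).filter (fun t => decide (key t = (j : Int))) with hg'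
    have hgg' : ∀ j : Nat, j ≠ k → g' j = g j := by
      intro j hj
      simp only [hg', hg, List.filter_append, List.filter_cons, List.filter_nil]
      have : ¬ (key x = (j : Int)) := by omega
      simp [this]
    have hg'k : g' k = g k ++ [x] := by
      simp only [hg', hg, List.filter_append, List.filter_cons, List.filter_nil]
      simp [hkx]
    -- split the range at k on both sides
    conv_lhs => rw [hsplit]
    conv_rhs => rw [hsplit]
    rw [List.range_add]
    simp only [List.map_append, List.flatten_append, List.map_map]
    -- the prefix of groups with key ≤ k is skipped; x goes in front of the rest
    have hA : ∀ a ∈ ((List.range (k + 1)).map g).flatten,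
        (decide (key x < key a)) = false := by
      intro a ha
      rcases List.mem_flatten.mp ha with ⟨l, hl, hal⟩
      rcases List.mem_map.mp hl with ⟨j, hj, rfl⟩
      have hjk : j < k + 1 := List.mem_range.mp hj
      have := List.of_mem_filter hal
      simp only [decide_eq_true_eq] at this
      simp only [decide_eq_false_iff_not, not_lt, hkx, this]
      exact_mod_cast Nat.le_of_lt_succ hjk
    have hB : ∀ a ∈ ((List.range (K - (k + 1))).map (fun j => g (k + 1 + j))).flatten,
        (decide (key x < key a)) = true := by
      intro a ha
      rcases List.mem_flatten.mp ha with ⟨l, hl, hal⟩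
      rcases List.mem_map.mp hl with ⟨j, hj, rfl⟩
      have := List.of_mem_filter hal
      simp only [decide_eq_true_eq] at this
      simp only [decide_eq_true_eq, hkx, this]
      push_cast
      omega
    rw [pvInsertBy_append_left _ _ _ _ hA, pvInsertBy_front _ _ _ hB]
    -- prefix groups: only group k changes, by appending x at its end
    have hpre : ((List.range (k + 1)).map g').flatten =
        ((List.range (k + 1)).map g).flatten ++ [x] := by
      rw [List.range_succ]
      simp only [List.map_append, List.flatten_append, List.map_cons, List.map_nil,
        List.flatten_cons, List.flatten_nil]
      have : (List.range k).map g' = (List.range k).map g :=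
        List.map_congr_left (fun j hj => hgg' j (Nat.ne_of_lt (List.mem_range.mp hj)))
      rw [this, hg'k]
      simp
    have hsuf : (List.range (K - (k + 1))).map (g' ∘ fun j => k + 1 + j) =
        (List.range (K - (k + 1))).map (g ∘ fun j => k + 1 + j) :=
      List.map_congr_left (fun j _ => hgg' (k + 1 + j) (by omega))
    rw [hpre, hsuf]
    simp

-- the filtered group of key i, undecorated, is exactly column i
theorem pvEnumerate_filter_eq (articles : List (List (String × String))) (s c : Int) :
    ((PySem.List.enumerate articles s).filter (fun t => decide (t.1 = c))).map (fun t => t.2) =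
      (if 0 ≤ c - s then articles[(c - s).toNat]? else none).toList := by
  induction articles generalizing s with
  | nil => simp [PySem.List.enumerate]
  | cons a rest ih =>
    rw [PySem.List.enumerate_cons]
    by_cases hsc : s = c
    · subst hsc
      have hrest : (PySem.List.enumerate rest (s + 1)).filter (fun t => decide (t.1 = s)) = [] := by
        rw [List.filter_eq_nil_iff]
        intro t ht
        rcases (PySem.List.mem_enumerate_iff rest (s + 1) t).mp ht with ⟨j, hj, rfl⟩
        simp only [decide_eq_true_eq]
        omega
      simp [hrest]
    · have h1 : ¬ ((s, a).1 = c) := hsc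
      rw [List.filter_cons, if_neg (by simpa using h1)]
      rw [ih (s + 1)]
      by_cases hle : 0 ≤ c - s
      · have hgt : 1 ≤ c - s := by omega
        rw [if_pos (by omega : (0:Int) ≤ c - (s + 1)), if_pos hle]
        have h2 : (c - s).toNat = (c - (s + 1)).toNat + 1 := by omega
        rw [h2, List.getElem?_cons_succ]
      · rw [if_neg (by omega : ¬ ((0:Int) ≤ c - (s + 1))), if_neg hle]

theorem pvGroup_eq_col (lists : List (List (List (String × String)))) (i : Nat) :
    ((pvDecorated lists).filter (fun t => decide (t.1 = (i : Int)))).map (fun t => t.2) =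
      pvCol lists i := by
  induction lists with
  | nil => simp [pvDecorated, pvCol]
  | cons a rest ih =>
    simp only [pvDecorated, List.flatMap_cons, List.filter_append, List.map_append] at *
    rw [ih]
    have := pvEnumerate_filter_eq a 0 (i : Int)
    simp only [Int.sub_zero, Int.toNat_natCast] at this
    rw [if_pos (by positivity)] at this
    rw [this]
    simp only [pvCol, List.filterMap_cons]
    cases a[i]? <;> simp

-- every decoration key is a valid column index
theorem pvDecorated_bounds (lists : List (List (List (String × String)))) :
    ∀ t ∈ pvDecorated lists, 0 ≤ t.1 ∧ t.1 < (pvMaxLen lists : Int) := by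
  intro t ht
  rcases List.mem_flatMap.mp ht with ⟨l, hl, htl⟩
  rcases (PySem.List.mem_enumerate_iff l 0 t).mp htl with ⟨j, hj, rfl⟩
  have := pvMaxLen_mem lists l hl
  refine ⟨by simp, ?_⟩
  omega

-- ===== VERDICT (by name: the statement is the Claim_ definition above) =====
theorem select_top_articles_spec : Claim_equal_select_top_articles := by
  intro lists m _
  unfold Spec_select_top_articles select_top_articles select_top_articles_alt
  have hA : pvOuterA lists m [] 0 =
      (((List.range (pvMaxLen lists)).map (pvCol lists)).flatten).take m.toNat := by
    by_cases hm : (0 : Int) < m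
    · rw [pvOuterA_spec lists m [] 0 (by simpa)]
      rw [List.nil_append, pvColsFrom_eq lists 0]
      rw [List.range_eq_range']
      simp
    · rw [pvOuterA, if_neg (by simp; omega)]
      have : m.toNat = 0 := by omega
      simp [this]
  have hB : (PySem.List.sorted (pvDecorated lists) (fun tag => tag.1)).map (fun tag => tag.2) =
      ((List.range (pvMaxLen lists)).map (pvCol lists)).flatten := by
    rw [pvSorted_groups (pvDecorated lists) (fun tag => tag.1) (pvMaxLen lists)
      (pvDecorated_bounds lists)]
    rw [List.map_flatten, List.map_map]
    exact congrArg List.flatten (List.map_congr_left (fun i _ => pvGroup_eq_col lists i))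
  have hmax : (max m 0).toNat = m.toNat := by omega
  rw [hA, ← hB, hmax, ← List.map_take]
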